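-- pv_equiv track=rewrite | github.com/PeterDuska/ML_Project | Test_CNN.py | _combine_tokens
-- ===== SOURCE A (Python) =====
-- def _combine_tokens(tokens):
--     expr_tokens = []
--     number_buf = ""
--     for tok in tokens:
--         if tok.isdigit():
--             number_buf += tok
--             continue
--         if number_buf:
--             expr_tokens.append(number_buf)
--             number_buf = ""
--         if tok in "+-*/=":
--             expr_tokens.append(tok)
--     if number_buf:
--         expr_tokens.append(number_buf)
--     return expr_tokens
-- ===== SOURCE B (Python) =====
-- def _combine_tokens(tokens):
--     # group-then-map: find each maximal run of digit tokens, join it into one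
--     # number; for non-digit tokens keep exactly those passing `tok in "+-*/="`.
--     out = []
--     i, n = 0, len(tokens)
--     while i < n:
--         if tokens[i].isdigit():
--             j = i
--             while j < n and tokens[j].isdigit():
--                 j += 1
--             out.append("".join(tokens[i:j]))
--             i = j
--         else:
--             if tokens[i] in "+-*/=":
--                 out.append(tokens[i])
--             i += 1
--     return out
-- ===== Notes on version B (the rewrite author's own statement) =====
-- stated objective: alternative
-- what changed: Replaces A's flush-on-boundary number-buffer state machine with a group-then-map pass that locates each maximal run of digit tokens, joins it with ''.join in one step, and skips past it, keeping the literal `tok in "+-*/="` substring test for non-digit tokens.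
import Mathlib
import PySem

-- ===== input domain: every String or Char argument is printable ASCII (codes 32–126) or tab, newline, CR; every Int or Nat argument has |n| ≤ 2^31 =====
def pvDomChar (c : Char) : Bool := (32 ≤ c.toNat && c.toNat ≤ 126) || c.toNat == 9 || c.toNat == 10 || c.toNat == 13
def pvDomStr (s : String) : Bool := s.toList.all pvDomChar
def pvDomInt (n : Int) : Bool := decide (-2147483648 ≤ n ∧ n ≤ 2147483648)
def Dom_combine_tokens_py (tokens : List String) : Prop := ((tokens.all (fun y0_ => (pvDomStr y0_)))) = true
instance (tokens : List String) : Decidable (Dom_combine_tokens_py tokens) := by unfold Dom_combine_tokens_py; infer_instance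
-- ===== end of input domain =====

-- B replaces A's flush-on-boundary number-buffer state machine by a group-then-map pass
-- (each maximal digit run is located and joined at once); objective: alternative decomposition.

-- ===== PORT A =====
-- the loop over `tokens` with state (expr_tokens, number_buf), as structural recursion
def combineTokensLoop (acc : List String) (buf : String) : List String → List String
  | [] => if buf ≠ "" then acc ++ [buf] else acc
  | t :: ts =>
    if PySem.Str.strIsdigit t then
      combineTokensLoop acc (buf ++ t) ts
    else
      let acc' := if buf ≠ "" then acc ++ [buf] else acc
      let acc'' := if PySem.Str.isIn t "+-*/=" then acc' ++ [t] else acc'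
      combineTokensLoop acc'' "" ts

def combine_tokens_py (tokens : List String) : List String :=
  combineTokensLoop [] "" tokens

-- ===== PORT B =====
-- Source B's outer while-loop: at a digit token, scan the maximal digit run (the inner
-- while over j = takeWhile), join it, and continue past it (i = j = dropWhile)
def combineTokensGroups : List String → List String
  | [] => []
  | t :: ts =>
    if PySem.Str.strIsdigit t then
      PySem.Str.join "" (t :: ts.takeWhile (fun s => PySem.Str.strIsdigit s))
        :: combineTokensGroups (ts.dropWhile (fun s => PySem.Str.strIsdigit s))
    else
      (if PySem.Str.isIn t "+-*/=" then [t] else []) ++ combineTokensGroups ts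
termination_by l => l.length
decreasing_by
  · exact Nat.lt_succ_of_le (List.length_dropWhile_le _ _)
  · simp

def combine_tokens_py_alt (tokens : List String) : List String :=
  combineTokensGroups tokens

-- ===== PRECONDITION & SPEC =====
def Spec_combine_tokens_py (tokens : List String) (out : List String) : Prop := out = combine_tokens_py_alt tokens
instance (tokens : List String) (out : List String) : Decidable (Spec_combine_tokens_py tokens out) := by unfold Spec_combine_tokens_py; infer_instance

-- ===== CLAIM (what is proved, stated in full; the proofs are below) =====
def Claim_equal_combine_tokens_py : Prop := ∀ (tokens : List String), Dom_combine_tokens_py tokens → Spec_combine_tokens_py tokens (combine_tokens_py tokens)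

-- ===== LEMMAS AND PROOFS =====

-- the tokens a pending buffer `buf` followed by the digit run `run` contributes
def emitBuf (buf : String) (run : List String) : List String :=
  if buf ++ PySem.Str.join "" run ≠ "" then [buf ++ PySem.Str.join "" run] else []

theorem pv_flat_inter {α : Type} (l : List (List α)) :
    (List.intersperse [] l).flatten = l.flatten := by
  induction l with
  | nil => rfl
  | cons x xs ih =>
    cases xs with
    | nil => simp
    | cons y ys => simp_all [List.intersperse]

theorem pv_join_cons (t : String) (r : List String) :
    PySem.Str.join "" (t :: r) = t ++ PySem.Str.join "" r := by
  simp only [PySem.Str.join, PySem.Chars.join, List.intercalate, List.map,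
    String.toList_empty, pv_flat_inter, List.flatten_cons]
  have h : ∀ (l m : List Char), String.ofList (l ++ m) = String.ofList l ++ String.ofList m := by
    intro l m; apply String.toList_injective; simp
  rw [h]
  congr 1
  exact String.ofList_toList

theorem pv_isdigit_ne (t : String) (h : PySem.Str.strIsdigit t = true) : t ≠ "" := by
  simp only [PySem.Str.strIsdigit, PySem.Chars.strIsdigit, Bool.and_eq_true,
    Bool.not_eq_true'] at h
  intro he; subst he; simp at h

theorem pv_append_ne (a b : String) (h : a ≠ "") : a ++ b ≠ "" := by
  intro he
  have h2 := congrArg String.toList he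
  simp only [String.toList_append, String.toList_empty, List.append_eq_nil_iff] at h2
  exact h (by cases a; simp_all)

theorem pv_join_ne (t : String) (r : List String) (h : t ≠ "") :
    PySem.Str.join "" (t :: r) ≠ "" := by
  rw [pv_join_cons]; exact pv_append_ne t _ h

theorem pv_emit_cons (buf t : String) (run : List String) :
    emitBuf (buf ++ t) run = emitBuf buf (t :: run) := by
  unfold emitBuf
  rw [pv_join_cons, ← String.append_assoc]

theorem pv_loop_acc (ts : List String) : ∀ (acc : List String) (buf : String),
    combineTokensLoop acc buf ts = acc ++ combineTokensLoop [] buf ts := by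
  induction ts with
  | nil => intro acc buf; by_cases h : buf = "" <;> simp [combineTokensLoop, h]
  | cons t ts ih =>
    intro acc buf
    by_cases hd : PySem.Str.strIsdigit t
    · simp only [combineTokensLoop, hd, if_pos]
      exact ih acc (buf ++ t)
    · simp only [combineTokensLoop, hd, Bool.false_eq_true, if_false]
      rw [ih, ih (if PySem.Str.isIn t "+-*/=" = true then (if buf ≠ "" then [] ++ [buf] else []) ++ [t] else if buf ≠ "" then [] ++ [buf] else [])]
      split_ifs <;> simp

theorem pv_groups_eq (ts : List String) :
    combineTokensGroups ts =
      emitBuf "" (ts.takeWhile (fun s => PySem.Str.strIsdigit s)) ++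
        combineTokensGroups (ts.dropWhile (fun s => PySem.Str.strIsdigit s)) := by
  cases ts with
  | nil => simp [combineTokensGroups, emitBuf, PySem.Str.join, PySem.Chars.join, List.intercalate]
  | cons t ts =>
    by_cases hd : PySem.Str.strIsdigit t
    · rw [List.takeWhile_cons_of_pos (by simpa using hd), List.dropWhile_cons_of_pos (by simpa using hd)]
      have hx := pv_join_ne t (ts.takeWhile (fun s => PySem.Str.strIsdigit s)) (pv_isdigit_ne t hd)
      simp only [combineTokensGroups, hd, if_pos, emitBuf, String.empty_append]
      rw [if_pos hx]
      simp
    · rw [List.takeWhile_cons_of_neg (by simpa using hd), List.dropWhile_cons_of_neg (by simpa using hd)]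
      simp [combineTokensGroups, emitBuf, PySem.Str.join, PySem.Chars.join, List.intercalate]

theorem pv_main (ts : List String) : ∀ (buf : String),
    combineTokensLoop [] buf ts =
      emitBuf buf (ts.takeWhile (fun s => PySem.Str.strIsdigit s)) ++
        combineTokensGroups (ts.dropWhile (fun s => PySem.Str.strIsdigit s)) := by
  induction ts with
  | nil =>
    intro buf
    by_cases h : buf = "" <;>
      simp [combineTokensLoop, combineTokensGroups, emitBuf, h, PySem.Str.join,
        PySem.Chars.join, List.intercalate]
  | cons t ts ih =>
    intro buf
    by_cases hd : PySem.Str.strIsdigit t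
    · rw [List.takeWhile_cons_of_pos (by simpa using hd), List.dropWhile_cons_of_pos (by simpa using hd)]
      simp only [combineTokensLoop, hd, if_pos]
      rw [ih (buf ++ t), pv_emit_cons]
    · rw [List.takeWhile_cons_of_neg (by simpa using hd), List.dropWhile_cons_of_neg (by simpa using hd)]
      simp only [combineTokensLoop, hd, Bool.false_eq_true, if_false]
      rw [pv_loop_acc, ih "", ← pv_groups_eq ts]
      simp only [combineTokensGroups, hd, Bool.false_eq_true, if_false, emitBuf]
      have hb : buf ++ PySem.Str.join "" ([] : List String) = buf := by
        show buf ++ "" = buf; simp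
      rw [hb]
      split_ifs <;> simp

-- ===== VERDICT (by name: the statement is the Claim_ definition above) =====
theorem combine_tokens_py_spec : Claim_equal_combine_tokens_py := by
  intro tokens _
  unfold Spec_combine_tokens_py combine_tokens_py combine_tokens_py_alt
  rw [pv_main tokens "", pv_groups_eq tokens]
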